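-- pv_equiv track=rewrite | github.com/jsg921019/python_algorithm | 1_Impliment/신고결과받기.py | solution
-- ===== SOURCE A (Python) =====
-- from collections import defaultdict, Counter
--
-- def solution(id_list, report, k):
--
--     report_dict = defaultdict(set)
--     report_cntr = Counter()
--
--     for r in report:
--         user1, user2 = r.split()
--         report_dict[user1].add(user2)
--
--     for v in report_dict.values():
--         report_cntr.update(v)
--
--     blacklist = {x for x in report_cntr if report_cntr[x] >= k}
--
--     return [len(report_dict[user] & blacklist) for user in id_list]
-- ===== SOURCE B (Python) =====
-- def solution(id_list, report, k):
--     edges = []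
--     for r in report:
--         u, v = r.split()
--         if (u, v) not in edges:
--             edges.append((u, v))
--     return [sum(1 for u2, v2 in edges
--                 if u2 == u and sum(1 for e in edges if e[1] == v2) >= k)
--             for u in id_list]
-- ===== Notes on version B (the rewrite author's own statement) =====
-- stated objective: simpler
-- what changed: Replaces A's dict-of-sets + Counter + blacklist-set intersection with a single deduplicated edge list; each answer is a direct count over the edges whose reported user has at least k distinct reporters.
import Mathlib
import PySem

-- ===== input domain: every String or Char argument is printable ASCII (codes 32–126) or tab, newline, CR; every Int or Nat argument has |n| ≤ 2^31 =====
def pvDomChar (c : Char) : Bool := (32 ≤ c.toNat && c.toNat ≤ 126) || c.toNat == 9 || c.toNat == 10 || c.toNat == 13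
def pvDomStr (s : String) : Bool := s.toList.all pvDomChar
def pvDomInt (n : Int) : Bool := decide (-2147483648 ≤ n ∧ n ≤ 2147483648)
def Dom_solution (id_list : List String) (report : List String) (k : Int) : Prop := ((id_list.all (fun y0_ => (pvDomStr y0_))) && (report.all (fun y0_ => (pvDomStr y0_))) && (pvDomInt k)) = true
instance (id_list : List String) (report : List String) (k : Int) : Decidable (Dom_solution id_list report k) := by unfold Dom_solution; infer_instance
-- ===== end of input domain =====

-- B replaces A's dict-of-sets + Counter + blacklist-set intersection with one deduplicated
-- edge list and direct counts over it (objective: simpler; not faster).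


-- ===== PORT A =====
def solution (id_list : List String) (report : List String) (k : Int) : List Int :=
  let report_dict : PySem.Dict String (PySem.Set String) :=
    report.foldl (fun d r =>
      match PySem.Str.split₀ r with
      | [user1, user2] => d.modify user1 PySem.Set.empty (fun s => PySem.Set.add s user2)
      | _ => d) PySem.Dict.empty
  let report_cntr : PySem.Dict String Int :=
    report_dict.values.foldl (fun c v => v.foldl (fun c x => c.modify x 0 (· + 1)) c) PySem.Dict.empty
  let blacklist : PySem.Set String :=
    PySem.Set.ofList (report_cntr.keys.filter (fun x => decide (k ≤ report_cntr.getD x 0)))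
  id_list.map (fun user => PySem.Set.len (PySem.Set.inter (report_dict.getD user PySem.Set.empty) blacklist))

-- ===== PORT B =====
def solution_alt (id_list : List String) (report : List String) (k : Int) : List Int :=
  let edges : List (String × String) :=
    report.foldl (fun es r =>
      let ts := PySem.Str.split₀ r
      if ts.length = 2 then
        let e := (ts.getD 0 "", ts.getD 1 "")
        if e ∈ es then es else es ++ [e]
      else es) []
  id_list.map (fun u =>
    ((edges.countP (fun e => e.1 == u && decide (k ≤ (edges.countP (fun e2 => e2.2 == e.2) : Int)))) : Int))

-- ===== PRECONDITION & SPEC =====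
-- Pre_ excludes exactly the reports that do not split into two whitespace-separated
-- tokens: there Python A raises ValueError on tuple unpacking (and so does B).
def Pre_solution (id_list : List String) (report : List String) (k : Int) : Prop :=
  ∀ r ∈ report, (PySem.Str.split₀ r).length = 2
instance (id_list : List String) (report : List String) (k : Int) : Decidable (Pre_solution id_list report k) := by unfold Pre_solution; infer_instance
def pvWitness_solution : List String × List String × Int := (["a", "b", "c"], ["a b", "b a", "c a"], 2)
def Spec_solution (id_list : List String) (report : List String) (k : Int) (out : List Int) : Prop := out = solution_alt id_list report k
instance (id_list : List String) (report : List String) (k : Int) (out : List Int) : Decidable (Spec_solution id_list report k out) := by unfold Spec_solution; infer_instance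

-- ===== CLAIM (what is proved, stated in full; the proofs are below) =====
def Claim_equal_solution : Prop := ∀ (id_list : List String) (report : List String) (k : Int), Dom_solution id_list report k → Pre_solution id_list report k → Spec_solution id_list report k (solution id_list report k)

-- ===== LEMMAS AND PROOFS =====

theorem pv_build_inv (report : List String) (d : PySem.Dict String (PySem.Set String))
    (es : List (String × String))
    (hk : d.keys = PySem.Set.ofList (es.map Prod.fst))
    (hnd : es.Nodup)
    (hg : ∀ u, d.getD u PySem.Set.empty = (es.filter (fun e => e.1 == u)).map Prod.snd) :
    (report.foldl (fun d r => match PySem.Str.split₀ r with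
        | [user1, user2] => d.modify user1 PySem.Set.empty (fun s => PySem.Set.add s user2)
        | _ => d) d).keys
      = PySem.Set.ofList ((report.foldl (fun es r =>
        let ts := PySem.Str.split₀ r
        if ts.length = 2 then
          let e := (ts.getD 0 "", ts.getD 1 "")
          if e ∈ es then es else es ++ [e]
        else es) es).map Prod.fst)
    ∧ (report.foldl (fun es r =>
        let ts := PySem.Str.split₀ r
        if ts.length = 2 then
          let e := (ts.getD 0 "", ts.getD 1 "")
          if e ∈ es then es else es ++ [e]
        else es) es).Nodup
    ∧ ∀ u, (report.foldl (fun d r => match PySem.Str.split₀ r with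
        | [user1, user2] => d.modify user1 PySem.Set.empty (fun s => PySem.Set.add s user2)
        | _ => d) d).getD u PySem.Set.empty
      = ((report.foldl (fun es r =>
        let ts := PySem.Str.split₀ r
        if ts.length = 2 then
          let e := (ts.getD 0 "", ts.getD 1 "")
          if e ∈ es then es else es ++ [e]
        else es) es).filter (fun e => e.1 == u)).map Prod.snd := by
  induction report generalizing d es with
  | nil => exact ⟨hk, hnd, hg⟩
  | cons r rest ih =>
    simp only [List.foldl_cons]
    cases hsp : PySem.Str.split₀ r with
    | nil => exact ih d es hk hnd hg
    | cons a l =>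
      cases l with
      | nil => exact ih d es hk hnd hg
      | cons b l2 =>
        cases l2 with
        | cons c l3 => exact ih d es hk hnd hg
        | nil =>
          -- the two-token case: a reports b
          have hmemv : (b ∈ d.getD a PySem.Set.empty) ↔ (a, b) ∈ es := by
            rw [hg a]
            constructor
            · intro h
              obtain ⟨e, he, hb⟩ := List.mem_map.mp h
              have := List.mem_filter.mp he
              have h1 : e.1 = a := by simpa using this.2
              have : e = (a, b) := Prod.ext h1 hb
              exact this ▸ this.symm ▸ (List.mem_filter.mp he).1
            · intro h
              exact List.mem_map.mpr ⟨(a, b), List.mem_filter.mpr ⟨h, by simp⟩, rfl⟩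
          simp only [List.length_cons, List.length_nil, List.getD_cons_zero,
            List.getD_cons_succ]
          by_cases hmem : (a, b) ∈ es
          · -- edge already present: es unchanged, dict observationally unchanged
            simp only [hmem, if_true]
            apply ih
            · rw [PySem.Dict.keys_modify, PySem.Dict.keys_insert_of_contains, hk]
              rw [PySem.Dict.contains_iff_mem_keys, hk, PySem.Set.mem_ofList]
              exact List.mem_map.mpr ⟨(a, b), hmem, rfl⟩
            · exact hnd
            · intro u
              rw [PySem.Dict.getD_modify]
              split
              · next h =>
                subst h
                have hb : b ∈ d.getD u PySem.Set.empty := hmemv.mpr hmem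
                rw [show PySem.Set.add (d.getD u PySem.Set.empty) b = d.getD u PySem.Set.empty by
                  simp only [PySem.Set.add, PySem.Set.contains]
                  rw [if_pos (by simpa using hb)]]
                exact hg u
              · exact hg u
          · -- new edge: es grows by (a, b)
            simp only [hmem, if_false, if_true]
            apply ih
            · rw [PySem.Dict.keys_modify, List.map_append, PySem.Set.ofList_eq_foldl,
                List.foldl_append, ← PySem.Set.ofList_eq_foldl]
              by_cases hca : d.contains a = true
              · have ham : a ∈ PySem.Set.ofList (es.map Prod.fst) := by
                  rw [← hk]; exact (PySem.Dict.contains_iff_mem_keys d a).mp hca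
                rw [PySem.Dict.keys_insert_of_contains _ _ hca, hk]
                simp [PySem.Set.add, PySem.Set.contains, ham]
              · have ham : a ∉ PySem.Set.ofList (es.map Prod.fst) := by
                  rw [← hk]
                  intro h
                  exact hca ((PySem.Dict.contains_iff_mem_keys d a).mpr h)
                rw [PySem.Dict.keys_insert_of_not_contains _ _ (by simpa using hca), hk]
                simp [PySem.Set.add, PySem.Set.contains, ham]
            · refine List.Nodup.append hnd (List.nodup_singleton _) ?_
              intro x hx hx2
              simp only [List.mem_singleton] at hx2
              subst hx2
              exact hmem hx
            · intro u
              rw [PySem.Dict.getD_modify, List.filter_append]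
              split
              · next h =>
                subst h
                have hb : b ∉ d.getD u PySem.Set.empty := fun h => hmem (hmemv.mp h)
                rw [show PySem.Set.add (d.getD u PySem.Set.empty) b
                    = d.getD u PySem.Set.empty ++ [b] by
                  simp only [PySem.Set.add, PySem.Set.contains]
                  rw [if_neg (by simpa using hb)]]
                rw [hg u]
                simp
              · next h =>
                have hne : ((a : String) == u) = false := by
                  simp only [beq_eq_false_iff_ne, ne_eq]
                  exact fun hh => h hh.symm
                rw [hg u]
                simp [hne]

theorem pv_sum_partition (es : List (String × String)) (U : List String) (hU : U.Nodup)
    (hcov : ∀ e ∈ es, e.1 ∈ U) (v : String) :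
    (U.map (fun u => (es.countP (fun e => e.2 == v && e.1 == u) : Int))).sum
      = (es.countP (fun e => e.2 == v) : Int) := by
  induction es with
  | nil => simp
  | cons e t ih =>
    have hcov' : ∀ e' ∈ t, e'.1 ∈ U := fun e' h => hcov e' (List.mem_cons_of_mem _ h)
    have h1 : e.1 ∈ U := hcov e (List.mem_cons_self ..)
    have hsplit : (U.map (fun u => ((e :: t).countP (fun e => e.2 == v && e.1 == u) : Int))).sum
        = (U.map (fun u => (t.countP (fun e => e.2 == v && e.1 == u) : Int))).sum
          + (U.map (fun u => if (e.2 == v && e.1 == u) = true then (1:Int) else 0)).sum := by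
      rw [← PySem.List.sum_map_add_int]
      congr 1
      refine List.map_congr_left (fun u _ => ?_)
      simp only [List.countP_cons]
      split <;> push_cast <;> ring
    rw [hsplit, ih hcov', PySem.List.sum_map_ite_one_zero, List.countP_cons]
    by_cases h2 : (e.2 == v) = true
    · have : List.countP (fun u => e.2 == v && e.1 == u) U = List.countP (· == e.1) U := by
        refine List.countP_congr (fun u _ => ?_)
        simp only [h2, Bool.true_and, beq_iff_eq]
        exact eq_comm
      rw [this, ← List.count_eq_countP, List.count_eq_one_of_mem hU h1]
      simp [h2]
    · have : List.countP (fun u => e.2 == v && e.1 == u) U = 0 := by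
        rw [List.countP_eq_zero]
        intro u _
        simp [h2]
      rw [this]
      simp [h2]

theorem pv_cntr_getD (vals : List (PySem.Set String)) (c0 : PySem.Dict String Int) (v : String) :
    (vals.foldl (fun c s => s.foldl (fun c x => c.modify x 0 (· + 1)) c) c0).getD v 0
      = c0.getD v 0 + ((vals.map (fun s => (List.count v s : Int))).sum) := by
  induction vals generalizing c0 with
  | nil => simp
  | cons s t ih =>
    simp only [List.foldl_cons, List.map_cons, List.sum_cons, ih,
      PySem.Dict.getD_foldl_modify_add_one]
    ring

theorem pv_cntr_keys (vals : List (PySem.Set String)) (c0 : PySem.Dict String Int) :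
    (vals.foldl (fun c s => s.foldl (fun c x => c.modify x 0 (· + 1)) c) c0).keys
      = PySem.Set.update c0.keys vals.flatten := by
  induction vals generalizing c0 with
  | nil => simp [PySem.Set.update]
  | cons s t ih =>
    simp only [List.foldl_cons, ih, PySem.Dict.keys_foldl_modify, List.flatten_cons,
      PySem.Set.update, List.foldl_append]

-- ===== VERDICT (by name: the statement is the Claim_ definition above) =====
theorem pv_point (report : List String) (k : Int) (u : String) :
    (let report_dict : PySem.Dict String (PySem.Set String) :=
      report.foldl (fun d r =>
        match PySem.Str.split₀ r with
        | [user1, user2] => d.modify user1 PySem.Set.empty (fun s => PySem.Set.add s user2)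
        | _ => d) PySem.Dict.empty
    let report_cntr : PySem.Dict String Int :=
      report_dict.values.foldl (fun c v => v.foldl (fun c x => c.modify x 0 (· + 1)) c) PySem.Dict.empty
    let blacklist : PySem.Set String :=
      PySem.Set.ofList (report_cntr.keys.filter (fun x => decide (k ≤ report_cntr.getD x 0)))
    PySem.Set.len (PySem.Set.inter (report_dict.getD u PySem.Set.empty) blacklist))
    = (let edges : List (String × String) :=
        report.foldl (fun es r =>
          let ts := PySem.Str.split₀ r
          if ts.length = 2 then
            let e := (ts.getD 0 "", ts.getD 1 "")
            if e ∈ es then es else es ++ [e]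
          else es) []
      ((edges.countP (fun e => e.1 == u && decide (k ≤ (edges.countP (fun e2 => e2.2 == e.2) : Int)))) : Int)) := by
  obtain ⟨hk, hnd, hg⟩ := pv_build_inv report PySem.Dict.empty []
    (by simp [PySem.Set.ofList]) List.nodup_nil (by intro u; simp)
  simp only []
  set d := report.foldl (fun d r =>
        match PySem.Str.split₀ r with
        | [user1, user2] => d.modify user1 PySem.Set.empty (fun s => PySem.Set.add s user2)
        | _ => d) PySem.Dict.empty with hd
  set es := report.foldl (fun es r =>
        let ts := PySem.Str.split₀ r
        if ts.length = 2 then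
          let e := (ts.getD 0 "", ts.getD 1 "")
          if e ∈ es then es else es ++ [e]
        else es) ([] : List (String × String)) with hes
  clear_value d es
  have hkeysnd : d.keys.Nodup := by rw [hk]; exact PySem.Set.nodup_ofList _
  have hvals : d.values = d.keys.map (fun x => d.getD x PySem.Set.empty) :=
    PySem.Dict.values_eq_map_keys d hkeysnd PySem.Set.empty
  have hcov : ∀ e ∈ es, e.1 ∈ d.keys := by
    intro e he
    rw [hk, PySem.Set.mem_ofList]
    exact List.mem_map_of_mem he
  set cntr : PySem.Dict String Int :=
    d.values.foldl (fun c v => v.foldl (fun c x => c.modify x 0 (· + 1)) c)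
      PySem.Dict.empty with hcntr
  have hcnt : ∀ v, cntr.getD v 0 = (es.countP (fun e => e.2 == v) : Int) := by
    intro v
    rw [hcntr, pv_cntr_getD, PySem.Dict.getD_empty, zero_add, hvals, List.map_map]
    have h1 : d.keys.map ((fun s => (List.count v s : Int)) ∘ (fun x => d.getD x PySem.Set.empty))
        = d.keys.map (fun x => (es.countP (fun e => e.2 == v && e.1 == x) : Int)) := by
      refine List.map_congr_left (fun x _ => ?_)
      simp only [Function.comp_apply, hg x, List.count_eq_countP, List.countP_map,
        List.countP_filter]
    rw [h1, pv_sum_partition es d.keys hkeysnd hcov v]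
  have hmemk : ∀ e ∈ es, e.2 ∈ cntr.keys := by
    intro e he
    rw [hcntr, pv_cntr_keys, PySem.Dict.keys_empty,
      show PySem.Set.update ([] : PySem.Set String) d.values.flatten
          = PySem.Set.ofList d.values.flatten by rw [PySem.Set.ofList_eq_foldl]; rfl,
      PySem.Set.mem_ofList, List.mem_flatten]
    refine ⟨(es.filter (fun e2 => e2.1 == e.1)).map Prod.snd, ?_, ?_⟩
    · rw [hvals]
      exact List.mem_map.mpr ⟨e.1, hcov e he, (hg e.1).symm ▸ rfl⟩
    · exact List.mem_map.mpr ⟨e, List.mem_filter.mpr ⟨he, by simp⟩, rfl⟩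
  set bl := PySem.Set.ofList (cntr.keys.filter (fun x => decide (k ≤ cntr.getD x 0))) with hbl
  have hblc : ∀ e ∈ es, bl.contains e.2
      = decide (k ≤ (es.countP (fun e2 => e2.2 == e.2) : Int)) := by
    intro e he
    rw [Bool.eq_iff_iff]
    simp only [decide_eq_true_eq]
    constructor
    · intro h
      have h1 : e.2 ∈ bl := by simpa [PySem.Set.contains] using h
      rw [hbl, PySem.Set.mem_ofList, List.mem_filter] at h1
      have h2 := h1.2
      rw [hcnt] at h2
      simpa using h2
    · intro h
      have h1 : e.2 ∈ bl := by
        rw [hbl, PySem.Set.mem_ofList, List.mem_filter]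
        exact ⟨hmemk e he, by rw [hcnt]; simpa using h⟩
      simpa [PySem.Set.contains] using h1
  show PySem.Set.len (PySem.Set.inter (d.getD u PySem.Set.empty) bl) = _
  rw [show PySem.Set.len (PySem.Set.inter (d.getD u PySem.Set.empty) bl)
      = ((((d.getD u PySem.Set.empty).filter (fun x => bl.contains x)).length : Int)) from rfl]
  rw [hg u, List.filter_map, List.length_map, ← List.countP_eq_length_filter,
    List.countP_filter]
  congr 1
  refine List.countP_congr (fun e he => ?_)
  simp only [Function.comp_apply, Bool.and_eq_true]
  rw [hblc e he]
  simp only [decide_eq_true_eq]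
  tauto

-- ===== VERDICT (by name: the statement is the Claim_ definition above) =====
theorem solution_spec : Claim_equal_solution := by
  intro id_list report k _ _
  unfold Spec_solution solution solution_alt
  refine List.map_congr_left (fun u _ => ?_)
  exact pv_point report k u
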